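-- pv_equiv track=rewrite | github.com/nrthbnd/advent_of_code | day_01/day_01_second.py | count_similarity
-- ===== SOURCE A (Python) =====
-- def count_similarity(first_list: list, second_list:list) -> int:
--     appearing_dict = {}
--     similarity_score = 0
--     for value in first_list:
--         if value not in appearing_dict:
--             appearing_count = second_list.count(value)
--             appearing_dict[value] = appearing_count
--         similarity_score += appearing_dict[value]  * value
--
--     return similarity_score
-- ===== SOURCE B (Python) =====
-- def count_similarity(first_list: list, second_list: list) -> int:
--     fa = sorted(first_list)
--     sb = sorted(second_list)
--     n, m = len(fa), len(sb)
--     score = 0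
--     i = j = 0
--     while i < n:
--         v = fa[i]
--         cf = 0
--         while i < n and fa[i] == v:
--             cf += 1
--             i += 1
--         while j < m and sb[j] < v:
--             j += 1
--         cs = 0
--         while j < m and sb[j] == v:
--             cs += 1
--             j += 1
--         score += v * cf * cs
--     return score
-- ===== Notes on version B (the rewrite author's own statement) =====
-- stated objective: faster
-- what changed: Replaces A's hash-memoized per-distinct-value second_list.count scans by sorting both lists and a single two-pointer merge over runs of equal values.
import Mathlib
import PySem

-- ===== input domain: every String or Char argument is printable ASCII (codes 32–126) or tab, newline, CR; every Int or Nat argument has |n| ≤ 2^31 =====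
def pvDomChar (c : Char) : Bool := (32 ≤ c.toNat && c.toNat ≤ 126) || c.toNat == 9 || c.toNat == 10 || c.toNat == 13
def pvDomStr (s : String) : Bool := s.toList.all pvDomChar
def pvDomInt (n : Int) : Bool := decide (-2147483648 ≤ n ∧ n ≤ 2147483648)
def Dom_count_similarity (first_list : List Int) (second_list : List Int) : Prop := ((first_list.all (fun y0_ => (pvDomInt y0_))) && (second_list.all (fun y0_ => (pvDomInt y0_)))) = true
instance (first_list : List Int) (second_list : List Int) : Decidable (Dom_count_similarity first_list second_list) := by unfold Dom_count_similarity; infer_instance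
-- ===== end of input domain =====

-- B sorts copies of both lists and accumulates the score in one two-pointer merge over runs of equal values, instead of A's memoized per-value .count scans.

-- ===== PORT A =====
def count_similarity (first_list : List Int) (second_list : List Int) : Int :=
  (first_list.foldl
    (fun (st : PySem.Dict Int Int × Int) value =>
      let d := if st.1.contains value then st.1
               else st.1.insert value (PySem.List.count second_list value : Int)
      (d, st.2 + d.getD value 0 * value))
    (PySem.Dict.empty, 0)).2

-- ===== PORT B =====
-- the merge loop of Source B: consume the run of v at the head of fa (cf copies),
-- skip sb entries < v, consume the run of v in sb (cs copies), add v*cf*cs, recurse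
def csMerge (fa : List Int) (sb : List Int) : Int :=
  match fa with
  | [] => 0
  | v :: rest =>
    let cf : Int := 1 + (rest.takeWhile (fun x => x == v)).length
    let fa' := rest.dropWhile (fun x => x == v)
    let sb1 := sb.dropWhile (fun x => decide (x < v))
    let cs : Int := (sb1.takeWhile (fun x => x == v)).length
    let sb2 := sb1.dropWhile (fun x => x == v)
    v * cf * cs + csMerge fa' sb2
termination_by fa.length
decreasing_by
  simp only [List.length_cons]
  exact Nat.lt_succ_of_le (List.length_dropWhile_le _ _)

def count_similarity_alt (first_list : List Int) (second_list : List Int) : Int :=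
  csMerge (PySem.List.sorted first_list (fun x => x) false)
          (PySem.List.sorted second_list (fun x => x) false)

-- ===== PRECONDITION & SPEC =====
def Spec_count_similarity (first_list : List Int) (second_list : List Int) (out : Int) : Prop := out = count_similarity_alt first_list second_list
instance (first_list : List Int) (second_list : List Int) (out : Int) : Decidable (Spec_count_similarity first_list second_list out) := by unfold Spec_count_similarity; infer_instance

-- ===== CLAIM (what is proved, stated in full; the proofs are below) =====
def Claim_equal_count_similarity : Prop := ∀ (first_list : List Int) (second_list : List Int), Dom_count_similarity first_list second_list → Spec_count_similarity first_list second_list (count_similarity first_list second_list)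

-- ===== LEMMAS AND PROOFS =====

-- the common value: ∑_{v ∈ fl} v * count(sl, v)
def csScore (fl sl : List Int) : Int :=
  (fl.map (fun v => v * (sl.count v : Int))).sum

-- A's fold computes csScore (invariant: the dict caches counts of second_list)
theorem count_similarity_aux (second_list : List Int) :
    ∀ (fl : List Int) (d : PySem.Dict Int Int) (s : Int),
      (∀ k, d.contains k = true → d.getD k 0 = (PySem.List.count second_list k : Int)) →
      (fl.foldl
        (fun (st : PySem.Dict Int Int × Int) value =>
          let d := if st.1.contains value then st.1
                   else st.1.insert value (PySem.List.count second_list value : Int)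
          (d, st.2 + d.getD value 0 * value))
        (d, s)).2
      = s + csScore fl second_list := by
  intro fl
  induction fl with
  | nil => intro d s h; simp [csScore]
  | cons v fl ih =>
    intro d s h
    simp only [List.foldl_cons, csScore, List.map_cons, List.sum_cons]
    by_cases hc : d.contains v = true
    · simp only [hc, if_true]
      rw [ih d _ h, h v hc, PySem.List.count_eq]
      simp only [csScore]; ring_nf
    · simp only [Bool.not_eq_true] at hc
      simp only [hc, Bool.false_eq_true, if_false]
      rw [ih (d.insert v (PySem.List.count second_list v : Int)) _ ?_,
          PySem.Dict.getD_insert_self, PySem.List.count_eq]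
      · simp only [csScore]; ring_nf
      · intro k hk
        rw [PySem.Dict.contains_insert] at hk
        by_cases hkv : k = v
        · subst hkv; rw [PySem.Dict.getD_insert_self]
        · rw [PySem.Dict.getD_insert, if_neg hkv]
          exact h k (by simpa [hkv] using hk)

theorem sum_map_of_all_eq (l : List Int) (c : Int) (h : ∀ x ∈ l, x = c) (f : Int → Int) :
    (l.map f).sum = l.length * f c := by
  induction l with
  | nil => simp
  | cons a t ih =>
    simp only [List.map_cons, List.sum_cons, List.length_cons]
    rw [h a (by simp), ih (fun x hx => h x (by simp [hx]))]
    push_cast; ring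

theorem gt_of_mem_dropWhile_beq (v : Int) :
    ∀ (l : List Int), l.Pairwise (· ≤ ·) → (∀ x ∈ l, v ≤ x) →
      ∀ x ∈ l.dropWhile (fun x => x == v), v < x := by
  intro l
  induction l with
  | nil => intro _ _ x hx; simp at hx
  | cons a t ih =>
    intro hp hge x hx
    by_cases ha : a = v
    · rw [List.dropWhile_cons_of_pos (by simp [ha])] at hx
      exact ih hp.tail (fun y hy => hge y (by simp [hy])) x hx
    · rw [List.dropWhile_cons_of_neg (by simp [ha])] at hx
      have hav : v < a := lt_of_le_of_ne (hge a (by simp)) (fun h => ha h.symm)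
      rcases List.mem_cons.1 hx with h | h
      · omega
      · exact lt_of_lt_of_le hav ((List.pairwise_cons.1 hp).1 x h)

theorem ge_of_mem_dropWhile_lt (v : Int) :
    ∀ (l : List Int), l.Pairwise (· ≤ ·) →
      ∀ x ∈ l.dropWhile (fun x => decide (x < v)), v ≤ x := by
  intro l
  induction l with
  | nil => intro _ x hx; simp at hx
  | cons a t ih =>
    intro hp x hx
    by_cases ha : a < v
    · rw [List.dropWhile_cons_of_pos (by simpa using ha)] at hx
      exact ih hp.tail x hx
    · rw [List.dropWhile_cons_of_neg (by simpa using ha)] at hx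
      rw [not_lt] at ha
      rcases List.mem_cons.1 hx with h | h
      · omega
      · exact le_trans ha ((List.pairwise_cons.1 hp).1 x h)

theorem count_eq_zero_of_forall_gt (v : Int) (l : List Int) (h : ∀ x ∈ l, v < x) :
    l.count v = 0 :=
  List.count_eq_zero.2 (fun hv => absurd (h v hv) (lt_irrefl v))

theorem count_eq_zero_of_forall_lt (v : Int) (l : List Int) (h : ∀ x ∈ l, x < v) :
    l.count v = 0 :=
  List.count_eq_zero.2 (fun hv => absurd (h v hv) (lt_irrefl v))

-- the merge loop on two sorted lists computes csScore
theorem csMerge_eq_score : ∀ (n : Nat) (fa sb : List Int), fa.length ≤ n →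
    fa.Pairwise (· ≤ ·) → sb.Pairwise (· ≤ ·) → csMerge fa sb = csScore fa sb := by
  intro n
  induction n with
  | zero =>
    intro fa sb hn _ _
    have : fa = [] := List.eq_nil_of_length_eq_zero (Nat.le_zero.1 hn)
    subst this; rw [csMerge.eq_def]; simp [csScore]
  | succ n ih =>
    intro fa sb hn hfa hsb
    match fa with
    | [] => rw [csMerge.eq_def]; simp [csScore]
    | v :: rest =>
      rw [csMerge.eq_def]
      simp only []
      set tw := rest.takeWhile (fun x => x == v) with htw
      set fa' := rest.dropWhile (fun x => x == v) with hfa'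
      set pre := sb.takeWhile (fun x => decide (x < v)) with hpre
      set sb1 := sb.dropWhile (fun x => decide (x < v)) with hsb1
      set tw2 := sb1.takeWhile (fun x => x == v) with htw2
      set sb2 := sb1.dropWhile (fun x => x == v) with hsb2
      -- structure of sb
      have hsbsplit : sb = pre ++ tw2 ++ sb2 := by
        rw [hpre, List.append_assoc, htw2, hsb2, hsb1, List.takeWhile_append_dropWhile,
            List.takeWhile_append_dropWhile]
      have hpre_lt : ∀ x ∈ pre, x < v := fun x hx => by
        simpa using List.mem_takeWhile_imp hx
      have htw2_eq : ∀ x ∈ tw2, x = v := fun x hx => by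
        simpa using List.mem_takeWhile_imp hx
      have hsb1_pairwise : sb1.Pairwise (· ≤ ·) := hsb.sublist (List.dropWhile_sublist _)
      have hsb1_ge : ∀ x ∈ sb1, v ≤ x := by
        intro x hx
        exact ge_of_mem_dropWhile_lt v sb hsb x (hsb1 ▸ hx)
      have hsb2_gt : ∀ x ∈ sb2, v < x :=
        gt_of_mem_dropWhile_beq v sb1 hsb1_pairwise hsb1_ge
      have hrest_ge : ∀ x ∈ rest, v ≤ x := (List.pairwise_cons.1 hfa).1
      have htw_eq : ∀ x ∈ tw, x = v := fun x hx => by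
        simpa using List.mem_takeWhile_imp hx
      have hfa'_gt : ∀ x ∈ fa', v < x :=
        gt_of_mem_dropWhile_beq v rest hfa.tail hrest_ge
      -- count of v in sb is tw2.length
      have hcount_v : (sb.count v : Int) = tw2.length := by
        rw [hsbsplit]
        simp only [List.count_append]
        rw [count_eq_zero_of_forall_lt v pre hpre_lt,
            count_eq_zero_of_forall_gt v sb2 hsb2_gt,
            List.count_eq_length.2 (fun b hb => (htw2_eq b hb).symm)]
        simp
      -- for elements > v, dropping pre and tw2 does not change the count
      have hcount_gt : ∀ w, v < w → (sb2.count w : Int) = sb.count w := by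
        intro w hw
        rw [hsbsplit]
        simp only [List.count_append]
        rw [count_eq_zero_of_forall_lt w pre (fun x hx => lt_trans (hpre_lt x hx) hw),
            count_eq_zero_of_forall_lt w tw2 (fun x hx => (htw2_eq x hx) ▸ hw)]
        simp
      -- recurse
      have hlen : fa'.length ≤ n := by
        have h1 : fa'.length ≤ rest.length := by
          rw [hfa']; exact List.length_dropWhile_le _ _
        have h2 : rest.length + 1 ≤ n + 1 := by simpa using hn
        omega
      have hfa'_pairwise : fa'.Pairwise (· ≤ ·) := hfa.tail.sublist (List.dropWhile_sublist _)
      have hsb2_pairwise : sb2.Pairwise (· ≤ ·) :=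
        hsb1_pairwise.sublist (List.dropWhile_sublist _)
      rw [ih fa' sb2 hlen hfa'_pairwise hsb2_pairwise]
      -- csScore fa' sb2 = csScore fa' sb
      have hscore' : csScore fa' sb2 = csScore fa' sb := by
        unfold csScore
        congr 1
        exact List.map_congr_left (fun x hx => by rw [hcount_gt x (hfa'_gt x hx)])
      rw [hscore']
      -- expand csScore (v :: rest) sb using rest = tw ++ fa'
      have hrest : rest = tw ++ fa' := (List.takeWhile_append_dropWhile).symm
      unfold csScore
      rw [hrest]
      simp only [List.map_cons, List.map_append, List.sum_cons, List.sum_append]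
      rw [sum_map_of_all_eq tw v htw_eq (fun x => x * (sb.count x : Int))]
      rw [← hcount_v]
      ring

-- csScore is invariant under permutation of either argument
theorem csScore_perm_left {fa fl : List Int} (h : fa.Perm fl) (sl : List Int) :
    csScore fa sl = csScore fl sl :=
  List.Perm.sum_eq (h.map _)

theorem csScore_perm_right (fl : List Int) {sa sl : List Int} (h : sa.Perm sl) :
    csScore fl sa = csScore fl sl := by
  unfold csScore
  congr 1
  exact List.map_congr_left (fun x _ => by rw [h.count_eq])

-- ===== VERDICT (by name: the statement is the Claim_ definition above) =====
theorem count_similarity_spec : Claim_equal_count_similarity := by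
  intro fl sl _
  unfold Spec_count_similarity count_similarity count_similarity_alt
  rw [count_similarity_aux sl fl PySem.Dict.empty 0
      (by intro k hk; simp [PySem.Dict.contains_empty] at hk)]
  rw [csMerge_eq_score (PySem.List.sorted fl (fun x => x) false).length _ _ le_rfl
      (by simpa using PySem.List.sorted_pairwise fl (fun x => x))
      (by simpa using PySem.List.sorted_pairwise sl (fun x => x))]
  rw [csScore_perm_left (PySem.List.sorted_perm fl (fun x => x) false) _,
      csScore_perm_right _ (PySem.List.sorted_perm sl (fun x => x) false)]
  simp
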